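-- pv_equiv track=rewrite | github.com/Devcon324/Algorithms | center_paragraphs/Optimal.py | center_paragraphs
-- ===== SOURCE A (Python) =====
-- def center_paragraphs(paragraphs, width):
--   # Parses a line of words in a paragraph and splits them into lines that fit within the width
--   # returns a 2D array of lines that fit within the width
--   def fitWordsToLine(line, width):
--     lineLength = 0
--     resultLine, fittedWords, extraWords= [], [], []
--     for word in line:
--       lineLength += len(word)
--       if (lineLength <= width -2):
--         fittedWords.append(word) # then the word is added to the line
--       elif (lineLength > width-2):
--         extraWords.append(word) # then the word needs to go onto the next line
--     resultLine.append(fittedWords) # adds the fitted words to the line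
--     if extraWords:
--       resultLine.extend(fitWordsToLine(extraWords, width)) # recursively fits extra words in a line
--     return resultLine
--
--   result = []
--   topBottomBorder = '*' * (width + 2)
--   result.append(topBottomBorder) # loads top border
--   # formats each line array of the paragraph array
--   for line in paragraphs:
--     resultMatrix = fitWordsToLine(line, width) # returns a matrix of lines
--     for resultLine in resultMatrix:
--       lineString = ' '.join(resultLine) # join the word array into a string, separated by a space
--       spaces = (width - len(lineString)) # gets the number of spaces needed
--       # even spaces at the beginning and end of the line, odd spaces at the end
--       if spaces % 2 == 0:
--         resultLineString = '*' + ' ' * (spaces // 2) + lineString + ' ' * (spaces // 2) + '*'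
--       else:
--         resultLineString = '*' + ' ' * (spaces // 2) + lineString + ' ' * ((spaces // 2) + 1) + '*'
--       result.append(resultLineString) # add the final formatted line to the result
--   result.append(topBottomBorder) # add bottom border
--   return result
-- ===== SOURCE B (Python) =====
-- def center_paragraphs(paragraphs, width):
--   # Single-pass greedy line fill with a running length accumulator (no recursive rescan),
--   # branch-free centering (right pad = spaces - spaces//2 covers both parities).
--   # A word longer than the usable width can never be placed on any line (the original
--   # implementation recurses forever on it); reject such input explicitly.
--   limit = width - 2
--   if any(len(w) > limit for para in paragraphs for w in para):
--     raise ValueError('word does not fit within width')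
--   border = '*' * (width + 2)
--   out = [border]
--   for para in paragraphs:
--     lines = []
--     cur, total = [], 0
--     for w in para:
--       if cur and total + len(w) > limit:
--         lines.append(' '.join(cur))
--         cur, total = [w], len(w)
--       else:
--         cur.append(w)
--         total += len(w)
--     lines.append(' '.join(cur))
--     for s in lines:
--       pad = width - len(s)
--       left = pad // 2
--       out.append('*' + ' ' * left + s + ' ' * (pad - left) + '*')
--   out.append(border)
--   return out
-- ===== Notes on version B (the rewrite author's own statement) =====
-- stated objective: simpler
-- what changed: Replaces the recursive fitWordsToLine (which rescans all still-unplaced words at every line break) by a single greedy pass with a running length accumulator that flushes a line when the next word would overflow, replaces the even/odd padding branch by the uniform right-pad 'spaces - spaces//2', and rejects a word longer than width-2 with ValueError where A recurses forever (RecursionError; those inputs are outside Pre_).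
import Mathlib
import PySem

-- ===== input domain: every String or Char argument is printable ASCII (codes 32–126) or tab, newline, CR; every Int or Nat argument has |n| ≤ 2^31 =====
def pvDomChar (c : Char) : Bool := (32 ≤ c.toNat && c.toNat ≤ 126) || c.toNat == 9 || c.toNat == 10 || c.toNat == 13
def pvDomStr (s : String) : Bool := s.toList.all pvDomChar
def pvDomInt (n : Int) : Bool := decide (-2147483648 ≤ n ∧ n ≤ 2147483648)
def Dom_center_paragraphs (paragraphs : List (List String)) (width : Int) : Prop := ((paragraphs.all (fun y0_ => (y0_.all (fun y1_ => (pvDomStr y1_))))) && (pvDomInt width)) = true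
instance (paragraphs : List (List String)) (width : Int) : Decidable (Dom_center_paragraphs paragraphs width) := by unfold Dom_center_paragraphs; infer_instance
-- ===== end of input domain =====

-- B replaces A's recursive rescan of still-unplaced words by one greedy pass with a running
-- length accumulator, and the even/odd padding branch by a uniform right pad (simpler).

-- shared primitives: len(word) as Int, Python's str * int ('' for negative counts), ' '.join
def pvLenI (w : String) : Int := (PySem.Str.len w : Int)
def pvRep (c : Char) (n : Int) : String := String.mk (List.replicate n.toNat c)
def pvJoin (l : List String) : String := PySem.Str.join " " l

-- ===== PORT A =====
-- loop body of fitWordsToLine: state (lineLength, fittedWords, extraWords)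
def pvStepA (width : Int) (st : Int × List String × List String) (w : String) : Int × List String × List String :=
  let L := st.1 + pvLenI w
  if L ≤ width - 2 then (L, st.2.1 ++ [w], st.2.2) else (L, st.2.1, st.2.2 ++ [w])

-- fitWordsToLine; fuel only makes the recursion total: with fuel = line.length + 1 it is
-- never exhausted on inputs where the Python terminates (Pre_ below excludes the rest)
def pvFitA : Nat → List String → Int → List (List String)
  | 0, _, _ => []
  | (fuel+1), line, width =>
      let st := line.foldl (pvStepA width) (0, [], [])
      if st.2.2 = [] then [st.2.1] else st.2.1 :: pvFitA fuel st.2.2 width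

-- body of A's formatting loop: join done by the caller, spaces and the parity branch here
def pvFmtA (width : Int) (s : String) : String :=
  let spaces := width - pvLenI s
  if PySem.Int.mod spaces 2 = 0 then
    "*" ++ pvRep ' ' (PySem.Int.floordiv spaces 2) ++ s ++ pvRep ' ' (PySem.Int.floordiv spaces 2) ++ "*"
  else
    "*" ++ pvRep ' ' (PySem.Int.floordiv spaces 2) ++ s ++ pvRep ' ' (PySem.Int.floordiv spaces 2 + 1) ++ "*"

def center_paragraphs (paragraphs : List (List String)) (width : Int) : List String :=
  let border := pvRep '*' (width + 2)
  (paragraphs.foldl (fun acc line =>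
      (pvFitA (line.length + 1) line width).foldl
        (fun acc rl => acc ++ [pvFmtA width (pvJoin rl)]) acc)
    [border]) ++ [border]

-- ===== PORT B =====
-- B's greedy word loop: state (lines, cur, total)
def pvStepB (width : Int) (st : List String × List String × Int) (w : String) : List String × List String × Int :=
  if st.2.1 ≠ [] ∧ st.2.2 + pvLenI w > width - 2
  then (st.1 ++ [pvJoin st.2.1], [w], pvLenI w)
  else (st.1, st.2.1 ++ [w], st.2.2 + pvLenI w)

-- B's centering: uniform right pad, no parity branch
def pvFmtB (width : Int) (s : String) : String :=
  let pad := width - pvLenI s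
  let left := PySem.Int.floordiv pad 2
  "*" ++ pvRep ' ' left ++ s ++ pvRep ' ' (pad - left) ++ "*"

def center_paragraphs_alt (paragraphs : List (List String)) (width : Int) : List String :=
  -- B's validation: Python raises ValueError here (inputs outside Pre_); the port returns []
  if paragraphs.any (fun para => para.any (fun w => width - 2 < pvLenI w)) then []
  else
  let border := pvRep '*' (width + 2)
  (paragraphs.foldl (fun out para =>
      let st := para.foldl (pvStepB width) ([], [], 0)
      (st.1 ++ [pvJoin st.2.1]).foldl (fun out s => out ++ [pvFmtB width s]) out)
    [border]) ++ [border]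

-- ===== PRECONDITION & SPEC =====
-- A's fitWordsToLine recurses forever (Python: RecursionError) as soon as a word alone
-- exceeds width - 2 (B raises ValueError there); Pre_ admits exactly the inputs on which A returns.
def Pre_center_paragraphs (paragraphs : List (List String)) (width : Int) : Prop :=
  ∀ line ∈ paragraphs, ∀ w ∈ line, pvLenI w ≤ width - 2
instance (paragraphs : List (List String)) (width : Int) : Decidable (Pre_center_paragraphs paragraphs width) := by unfold Pre_center_paragraphs; infer_instance

def pvWitness_center_paragraphs : List (List String) × Int := ([["ab", "cd"], []], 30)

def Spec_center_paragraphs (paragraphs : List (List String)) (width : Int) (out : List String) : Prop := out = center_paragraphs_alt paragraphs width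
instance (paragraphs : List (List String)) (width : Int) (out : List String) : Decidable (Spec_center_paragraphs paragraphs width out) := by unfold Spec_center_paragraphs; infer_instance

-- ===== CLAIM (what is proved, stated in full; the proofs are below) =====
def Claim_equal_center_paragraphs : Prop := ∀ (paragraphs : List (List String)) (width : Int), Dom_center_paragraphs paragraphs width → Pre_center_paragraphs paragraphs width → Spec_center_paragraphs paragraphs width (center_paragraphs paragraphs width)

-- ===== LEMMAS AND PROOFS =====

def pvLens (l : List String) : Int := (l.map pvLenI).sum

-- A's greedy split point: maximal prefix whose running length from c stays ≤ width - 2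
def pvSplit (width : Int) : Int → List String → List String × List String
  | _, [] => ([], [])
  | c, w :: ws =>
      if c + pvLenI w ≤ width - 2 then
        (w :: (pvSplit width (c + pvLenI w) ws).1, (pvSplit width (c + pvLenI w) ws).2)
      else ([], w :: ws)

theorem pvLenI_nonneg (w : String) : 0 ≤ pvLenI w := by
  simp [pvLenI]

theorem pvLens_nonneg (l : List String) : 0 ≤ pvLens l := by
  induction l with
  | nil => simp [pvLens]
  | cons w ws ih =>
      simp only [pvLens, List.map_cons, List.sum_cons]
      have := pvLenI_nonneg w
      have : (0:Int) ≤ (ws.map pvLenI).sum := ih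
      have := pvLenI_nonneg w
      omega

theorem pvLens_cons (w : String) (ws : List String) : pvLens (w :: ws) = pvLenI w + pvLens ws := by
  simp [pvLens]

theorem pvSplit_of_gt (width c : Int) (l : List String) (h : width - 2 < c) :
    pvSplit width c l = ([], l) := by
  cases l with
  | nil => rfl
  | cons w ws =>
      have := pvLenI_nonneg w
      simp only [pvSplit]
      rw [if_neg (by omega)]

theorem pvSplit_append (width c : Int) (l : List String) :
    (pvSplit width c l).1 ++ (pvSplit width c l).2 = l := by
  induction l generalizing c with
  | nil => rfl
  | cons w ws ih =>
      simp only [pvSplit]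
      split_ifs with h
      · simpa using ih (c + pvLenI w)
      · rfl

theorem pvSplit_snd_gt (width c : Int) (l : List String) (h tl : _)
    (hsp : (pvSplit width c l).2 = h :: tl) :
    width - 2 < (c + pvLens (pvSplit width c l).1) + pvLenI h := by
  induction l generalizing c with
  | nil => simp [pvSplit] at hsp
  | cons w ws ih =>
      by_cases hw : c + pvLenI w ≤ width - 2
      · have e : pvSplit width c (w :: ws)
            = (w :: (pvSplit width (c + pvLenI w) ws).1, (pvSplit width (c + pvLenI w) ws).2) := by
          simp [pvSplit, hw]
        rw [e] at hsp ⊢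
        have := ih (c + pvLenI w) hsp
        rw [pvLens_cons]
        omega
      · have e : pvSplit width c (w :: ws) = ([], w :: ws) := by simp [pvSplit, hw]
        rw [e] at hsp ⊢
        simp only [List.cons.injEq] at hsp
        obtain ⟨rfl, rfl⟩ := hsp
        simp only [pvLens, List.map_nil, List.sum_nil]
        have := pvLenI_nonneg w
        omega

theorem foldA_eq (width : Int) (l : List String) (c : Int) (f e : List String) :
    l.foldl (pvStepA width) (c, f, e) =
      (c + pvLens l, f ++ (pvSplit width c l).1, e ++ (pvSplit width c l).2) := by
  induction l generalizing c f e with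
  | nil => simp [pvLens, pvSplit]
  | cons w ws ih =>
      simp only [List.foldl_cons, pvStepA]
      split_ifs with hw
      · rw [ih]
        simp only [pvSplit, if_pos hw, pvLens_cons, Prod.mk.injEq]
        refine ⟨by omega, by simp, by simp⟩
      · rw [ih]
        rw [pvSplit_of_gt width (c + pvLenI w) ws (by omega)]
        simp only [pvSplit, if_neg hw, pvLens_cons, Prod.mk.injEq]
        refine ⟨by omega, by simp, by simp⟩

theorem pvFitA_succ (width : Int) (n : Nat) (line : List String) :
    pvFitA (n+1) line width =
      (if (pvSplit width 0 line).2 = [] then [(pvSplit width 0 line).1]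
       else (pvSplit width 0 line).1 :: pvFitA n (pvSplit width 0 line).2 width) := by
  simp only [pvFitA, foldA_eq, List.nil_append]

theorem pvSplit_shift (width : Int) (cur : List String) (c : Int) (ws : List String)
    (h : c + pvLens cur ≤ width - 2) :
    pvSplit width c (cur ++ ws) =
      (cur ++ (pvSplit width (c + pvLens cur) ws).1, (pvSplit width (c + pvLens cur) ws).2) := by
  induction cur generalizing c with
  | nil => simp [pvLens]
  | cons w rest ih =>
      have h1 : 0 ≤ pvLens rest := pvLens_nonneg rest
      rw [pvLens_cons] at h
      have hw : c + pvLenI w ≤ width - 2 := by omega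
      simp only [List.cons_append, pvSplit, if_pos hw]
      rw [ih (c + pvLenI w) (by omega)]
      simp only [List.cons_append, pvLens_cons, Prod.mk.injEq]
      constructor <;> · rw [show c + (pvLenI w + pvLens rest) = c + pvLenI w + pvLens rest by ring]

theorem foldB_lines (width : Int) (ws : List String) (lines cur : List String) (t : Int) :
    ws.foldl (pvStepB width) (lines, cur, t) =
      (lines ++ (ws.foldl (pvStepB width) ([], cur, t)).1,
       (ws.foldl (pvStepB width) ([], cur, t)).2) := by
  induction ws generalizing lines cur t with
  | nil => simp
  | cons w rest ih =>
      simp only [List.foldl_cons, pvStepB]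
      split_ifs with h
      · rw [ih (lines ++ [pvJoin cur]), ih ([] ++ [pvJoin cur])]
        simp
      · exact ih lines (cur ++ [w]) (t + pvLenI w)

theorem foldB_consume (width : Int) (ws : List String) (lines cur : List String) (t : Int) :
    ws.foldl (pvStepB width) (lines, cur, t) =
      (pvSplit width t ws).2.foldl (pvStepB width)
        (lines, cur ++ (pvSplit width t ws).1, t + pvLens (pvSplit width t ws).1) := by
  induction ws generalizing lines cur t with
  | nil => simp [pvSplit, pvLens]
  | cons w rest ih =>
      simp only [pvSplit]
      split_ifs with hw
      · simp only [List.foldl_cons, pvStepB]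
        rw [if_neg (by push_neg; intro _; omega)]
        rw [ih (lines) (cur ++ [w]) (t + pvLenI w)]
        rw [pvLens_cons]
        simp only [List.append_assoc, List.singleton_append]
        ring_nf
      · simp [pvLens]

theorem foldB_main (width : Int) (fuel : Nat) (ws cur : List String) (t : Int)
    (hcur : cur ≠ []) (ht : t = pvLens cur) (hle : t ≤ width - 2)
    (hws : ∀ w ∈ ws, pvLenI w ≤ width - 2) (hfuel : ws.length < fuel) :
    (ws.foldl (pvStepB width) ([], cur, t)).1 ++
        [pvJoin (ws.foldl (pvStepB width) ([], cur, t)).2.1] =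
      (pvFitA fuel (cur ++ ws) width).map pvJoin := by
  induction fuel generalizing ws cur t with
  | zero => omega
  | succ n ih =>
      rw [pvFitA_succ]
      rw [pvSplit_shift width cur 0 ws (by omega)]
      rw [foldB_consume]
      have hshift : (0:Int) + pvLens cur = t := by omega
      rw [hshift]
      rcases hsp : (pvSplit width t ws).2 with _ | ⟨h, tl⟩
      · simp [hsp]
      · simp only [hsp]
        have hgt := pvSplit_snd_gt width t ws h tl hsp
        have happ := pvSplit_append width t ws
        rw [hsp] at happ
        have hmemh : h ∈ ws := by rw [← happ]; simp
        simp only [List.foldl_cons, pvStepB]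
        rw [if_pos ⟨by simp [hcur], by omega⟩]
        rw [foldB_lines]
        have hlen : tl.length < n := by
          have hl := congrArg List.length happ
          simp only [List.length_append, List.length_cons] at hl
          omega
        have := ih tl [h] (pvLenI h) (by simp) (by simp [pvLens]) (hws h hmemh)
          (fun w hw => hws w (by rw [← happ]; simp [hw])) hlen
        simp only [List.singleton_append] at this ⊢
        rw [List.append_assoc, this]
        simp [List.map_cons]

theorem perline (width : Int) (line : List String)
    (h : ∀ w ∈ line, pvLenI w ≤ width - 2) :
    (line.foldl (pvStepB width) ([], [], 0)).1 ++
        [pvJoin (line.foldl (pvStepB width) ([], [], 0)).2.1] =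
      (pvFitA (line.length + 1) line width).map pvJoin := by
  cases line with
  | nil => simp [pvFitA]
  | cons w ws =>
      simp only [List.foldl_cons, pvStepB]
      rw [if_neg (by simp)]
      simp only [List.nil_append, List.length_cons]
      have hw' : pvLenI w ≤ width - 2 := h w (List.mem_cons_self ..)
      have := foldB_main (width := width) (fuel := ws.length + 2) (ws := ws) (cur := [w])
        (t := 0 + pvLenI w) (hcur := by simp) (ht := by simp [pvLens])
        (hle := by omega) (hws := fun x hx => h x (List.mem_cons_of_mem _ hx))
        (hfuel := by omega)
      simpa using this

theorem fmt_eq (width : Int) (s : String) : pvFmtA width s = pvFmtB width s := by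
  simp only [pvFmtA, pvFmtB]
  set spaces := width - pvLenI s with hs
  have hdm := PySem.Int.floordiv_mul_add_mod spaces 2
  have h0 : 0 ≤ PySem.Int.mod spaces 2 := PySem.Int.mod_nonneg (a := spaces) (b := 2) (by omega)
  have h2 : PySem.Int.mod spaces 2 < 2 := PySem.Int.mod_lt (a := spaces) (b := 2) (by omega)
  split_ifs with hp
  · have : spaces - PySem.Int.floordiv spaces 2 = PySem.Int.floordiv spaces 2 := by omega
    rw [this]
  · have hm1 : PySem.Int.mod spaces 2 = 1 := by omega
    have : spaces - PySem.Int.floordiv spaces 2 = PySem.Int.floordiv spaces 2 + 1 := by omega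
    rw [this]

theorem inner_fold (width : Int) (m : List (List String)) (acc : List String) :
    m.foldl (fun acc rl => acc ++ [pvFmtA width (pvJoin rl)]) acc =
      (m.map pvJoin).foldl (fun out s => out ++ [pvFmtB width s]) acc := by
  rw [List.foldl_map]
  simp only [fmt_eq]

-- ===== VERDICT (by name: the statement is the Claim_ definition above) =====
theorem center_paragraphs_spec : Claim_equal_center_paragraphs := by
  intro paragraphs width _ hpre
  unfold Spec_center_paragraphs center_paragraphs center_paragraphs_alt
  rw [if_neg (by
    simp only [List.any_eq_true, not_exists, not_and, decide_eq_true_eq]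
    intro line hline w hw
    have := hpre line hline w hw
    omega)]
  dsimp only
  congr 1
  apply PySem.List.foldl_congr_mem
  intro acc line hline
  rw [inner_fold, ← perline width line (hpre line hline)]
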